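-- pv_equiv track=rewrite | github.com/dragonier23/CP | codeforces/Round942/solution3.py | exceedMininRow
-- ===== SOURCE A (Python) =====
-- def exceedMininRow(xs):
--     minimum = min(xs)
--     inARow = 0
--     tmp = 0
--     for i in range(len(xs) * 2):
--         if xs[i%len(xs)] > minimum:
--            tmp += 1
--            if tmp > inARow:
--                inARow = tmp
--         else:
--             tmp = 0
--     return inARow
-- ===== SOURCE B (Python) =====
-- def exceedMininRow(xs):
--     m = min(xs)
--     best = 0
--     cur = 0
--     for x in xs:
--         cur = cur + 1 if x > m else 0
--         best = max(best, cur)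
--     lead = 0
--     for x in xs:
--         if not x > m:
--             break
--         lead += 1
--     return max(best, cur + lead)
-- ===== Notes on version B (the rewrite author's own statement) =====
-- stated objective: simpler
-- what changed: A scans a virtual doubled list (2n iterations with i % n indexing) keeping a running best; B makes one linear max-run pass over xs and handles the circular wrap in closed form as trailing-run + leading-run, since an element equal to the minimum always breaks the circle.
-- outside the precondition, e.g. on exceedMininRow([]): A raises ValueError, B raises ValueError
import Mathlib
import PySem

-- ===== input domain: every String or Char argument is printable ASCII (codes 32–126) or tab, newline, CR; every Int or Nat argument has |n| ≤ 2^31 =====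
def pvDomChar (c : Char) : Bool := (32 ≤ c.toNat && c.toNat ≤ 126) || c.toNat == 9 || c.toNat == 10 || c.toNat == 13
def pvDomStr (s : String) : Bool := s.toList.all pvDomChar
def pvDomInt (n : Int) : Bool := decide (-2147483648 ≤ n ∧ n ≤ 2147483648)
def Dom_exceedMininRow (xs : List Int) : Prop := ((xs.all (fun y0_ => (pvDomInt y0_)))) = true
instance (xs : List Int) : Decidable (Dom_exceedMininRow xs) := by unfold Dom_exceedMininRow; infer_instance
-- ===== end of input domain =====

-- B replaces A's doubled-list scan (2n iterations with modular indexing) by one linear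
-- max-run pass plus a closed-form circular-wrap combine (trailing run + leading run); objective: simpler.

-- ===== PORT A =====
-- loop body of A's `for i in range(len(xs)*2)`: state (inARow, tmp)
def pvStepA (minimum : Int) (st : Int × Int) (x : Int) : Int × Int :=
  if x > minimum then
    let tmp := st.2 + 1
    if tmp > st.1 then (tmp, tmp) else (st.1, tmp)
  else (st.1, 0)

def exceedMininRow (xs : List Int) : Int :=
  match PySem.List.min? xs (fun x => x) with
  | none => 0   -- unreachable under Pre_: min([]) raises ValueError
  | some minimum =>
    let n : Int := PySem.List.len xs
    let s := (PySem.List.pyRange 0 (n * 2) 1).foldl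
      (fun st i => pvStepA minimum st (PySem.List.pyGetD xs (PySem.Int.mod i n) 0)) (0, 0)
    s.1

-- ===== PORT B =====
-- loop body of B's single pass: state (best, cur)
def pvStepB (m : Int) (st : Int × Int) (x : Int) : Int × Int :=
  let cur := if x > m then st.2 + 1 else 0
  (max st.1 cur, cur)

-- B's `for x in xs: if not x > m: break; lead += 1`
def pvCountLead (m : Int) : List Int → Int
  | [] => 0
  | x :: rest => if x > m then 1 + pvCountLead m rest else 0

def exceedMininRow_alt (xs : List Int) : Int :=
  match PySem.List.min? xs (fun x => x) with
  | none => 0   -- unreachable under Pre_: min([]) raises ValueError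
  | some m =>
    let s := xs.foldl (pvStepB m) (0, 0)
    max s.1 (s.2 + pvCountLead m xs)

-- ===== PRECONDITION & SPEC =====
-- Pre_ excludes only the empty list, on which A's min(xs) raises ValueError.
def Pre_exceedMininRow (xs : List Int) : Prop := xs ≠ []
instance (xs : List Int) : Decidable (Pre_exceedMininRow xs) := by unfold Pre_exceedMininRow; infer_instance
def pvWitness_exceedMininRow : List Int := [1, 2]

def Spec_exceedMininRow (xs : List Int) (out : Int) : Prop := out = exceedMininRow_alt xs
instance (xs : List Int) (out : Int) : Decidable (Spec_exceedMininRow xs out) := by unfold Spec_exceedMininRow; infer_instance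

-- ===== CLAIM (what is proved, stated in full; the proofs are below) =====
def Claim_equal_exceedMininRow : Prop := ∀ (xs : List Int), Dom_exceedMininRow xs → Pre_exceedMininRow xs → Spec_exceedMininRow xs (exceedMininRow xs)

-- ===== LEMMAS AND PROOFS =====

-- A's step equals B's step whenever the running best is nonnegative.
theorem pvStepA_eq_stepB (m : Int) (st : Int × Int) (x : Int) (h : 0 ≤ st.1) :
    pvStepA m st x = pvStepB m st x := by
  unfold pvStepA pvStepB
  by_cases hx : x > m
  · simp only [if_pos hx]
    by_cases h2 : st.2 + 1 > st.1
    · rw [if_pos h2]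
      have hm : max st.1 (st.2 + 1) = st.2 + 1 := by omega
      simp [hm]
    · rw [if_neg h2]
      have hm : max st.1 (st.2 + 1) = st.1 := by omega
      simp [hm]
  · simp only [if_neg hx]
    have hm : max st.1 0 = st.1 := by omega
    simp [hm]

theorem pvFoldA_eq_foldB (m : Int) : ∀ (l : List Int) (st : Int × Int), 0 ≤ st.1 →
    l.foldl (pvStepA m) st = l.foldl (pvStepB m) st := by
  intro l
  induction l with
  | nil => intro st _; rfl
  | cons x t ih =>
    intro st h
    have h1 : 0 ≤ (pvStepB m st x).1 := by
      unfold pvStepB; simp; left; exact h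
    simp only [List.foldl_cons, pvStepA_eq_stepB m st x h]
    exact ih _ h1

-- invariant of B's fold: 0 ≤ cur ∧ cur ≤ best
theorem pvInv_foldB (m : Int) : ∀ (l : List Int) (st : Int × Int), 0 ≤ st.2 → st.2 ≤ st.1 →
    0 ≤ (l.foldl (pvStepB m) st).2 ∧ (l.foldl (pvStepB m) st).2 ≤ (l.foldl (pvStepB m) st).1 := by
  intro l
  induction l with
  | nil => intro st h1 h2; exact ⟨h1, h2⟩
  | cons x t ih =>
    intro st h1 h2
    simp only [List.foldl_cons]
    apply ih
    · unfold pvStepB; dsimp; split_ifs <;> omega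
    · unfold pvStepB; dsimp; split_ifs <;> simp

-- a run of elements all > m just extends cur and pushes best
theorem pvFoldB_run (m : Int) : ∀ (l : List Int) (b t : Int), (∀ x ∈ l, x > m) → 0 ≤ t → t ≤ b →
    l.foldl (pvStepB m) (b, t) = (max b (t + l.length), t + l.length) := by
  intro l
  induction l with
  | nil => intro b t _ _ hle; simp; omega
  | cons x tl ih =>
    intro b t hall h0 hle
    have hx : x > m := hall x (by simp)
    simp only [List.foldl_cons]
    have hstep : pvStepB m (b, t) x = (max b (t + 1), t + 1) := by
      unfold pvStepB; simp [hx]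
    rw [hstep, ih (max b (t+1)) (t+1) (fun y hy => hall y (by simp [hy])) (by omega) (le_max_right _ _)]
    rw [Prod.mk.injEq]
    have hL : (0:Int) ≤ (tl.length : Int) := by positivity
    refine ⟨?_, by simp [List.length_cons]; ring⟩
    simp only [List.length_cons]
    push_cast
    omega

-- the best component only ever grows by max; shift a max out of the initial state
theorem pvFoldB_shift (m : Int) : ∀ (l : List Int) (b c t : Int),
    l.foldl (pvStepB m) (max b c, t) =
      (max b (l.foldl (pvStepB m) (c, t)).1, (l.foldl (pvStepB m) (c, t)).2) := by
  intro l
  induction l with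
  | nil => intro b c t; rfl
  | cons x tl ih =>
    intro b c t
    simp only [List.foldl_cons]
    have h1 : pvStepB m (max b c, t) x = (max b (max c ((pvStepB m (c, t) x).2)), (pvStepB m (c, t) x).2) := by
      unfold pvStepB; dsimp; rw [max_assoc]
    have h2 : pvStepB m (c, t) x = (max c ((pvStepB m (c, t) x).2), (pvStepB m (c, t) x).2) := by
      unfold pvStepB; dsimp
    rw [h1, ih]
    conv_rhs => rw [h2]

-- decomposition of a list containing an element ≤ m, together with B's leading-run count
theorem pvExists_dec (m : Int) : ∀ (xs : List Int), (∃ x ∈ xs, ¬ x > m) →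
    ∃ lead w rest, xs = lead ++ w :: rest ∧ (∀ y ∈ lead, y > m) ∧ ¬ w > m ∧
      pvCountLead m xs = (lead.length : Int) := by
  intro xs
  induction xs with
  | nil => intro h; simp at h
  | cons x t ih =>
    intro h
    by_cases hx : x > m
    · obtain ⟨y, hy, hym⟩ := h
      have hyt : y ∈ t := by
        rcases List.mem_cons.mp hy with rfl | h'
        · exact absurd hx hym
        · exact h'
      obtain ⟨lead, w, rest, heq, hall, hw, hcnt⟩ := ih ⟨y, hyt, hym⟩
      refine ⟨x :: lead, w, rest, by simp [heq], ?_, hw, ?_⟩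
      · intro z hz
        rcases List.mem_cons.mp hz with rfl | h' <;> [exact hx; exact hall z h']
      · simp [pvCountLead, hx, hcnt]; ring
    · exact ⟨[], x, t, rfl, by simp, hx, by simp [pvCountLead, hx]⟩

-- the bridge: A's fold over range(2n) with modular indexing is a fold over xs ++ xs
theorem pvDouble (xs : List Int) (hne : xs ≠ []) (f : (Int × Int) → Int → (Int × Int)) (init : Int × Int) :
    (PySem.List.pyRange 0 (PySem.List.len xs * 2) 1).foldl
      (fun st i => f st (PySem.List.pyGetD xs (PySem.Int.mod i (PySem.List.len xs)) 0)) init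
    = (xs ++ xs).foldl f init := by
  have hnn : 0 < xs.length := List.length_pos_iff.mpr hne
  have hn : (0:Int) < PySem.List.len xs := by
    rw [PySem.List.len_eq]; exact_mod_cast hnn
  have hfirst : ∀ (init' : Int × Int),
      (PySem.List.pyRange 0 (PySem.List.len xs) 1).foldl
        (fun st i => f st (PySem.List.pyGetD xs (PySem.Int.mod i (PySem.List.len xs)) 0)) init'
      = xs.foldl f init' := by
    intro init'
    rw [PySem.List.foldl_congr_mem _
      (fun st i => f st (PySem.List.pyGetD xs (PySem.Int.mod i (PySem.List.len xs)) 0))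
      (fun st i => f st (PySem.List.pyGetD xs i 0)) init'
      (fun acc x hx => by
        have hmem := PySem.List.mem_pyRange_one.mp hx
        have hmod : PySem.Int.mod x (PySem.List.len xs) = x := by
          rw [PySem.Int.mod_eq_emod_of_pos hn]
          exact Int.emod_eq_of_lt hmem.1 hmem.2
        simp only [hmod])]
    exact PySem.List.foldl_pyRange_zero_pyGetD xs 0 f init'
  rw [PySem.List.pyRange_one_append 0 (PySem.List.len xs) (PySem.List.len xs * 2)
        (le_of_lt hn) (by omega), List.foldl_append, hfirst, List.foldl_append]
  -- second half: reindex range(n, 2n) to range(0, n)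
  have hsecond : ∀ (init' : Int × Int),
      (PySem.List.pyRange (PySem.List.len xs) (PySem.List.len xs * 2) 1).foldl
        (fun st i => f st (PySem.List.pyGetD xs (PySem.Int.mod i (PySem.List.len xs)) 0)) init'
      = (PySem.List.pyRange 0 (PySem.List.len xs) 1).foldl
        (fun st i => f st (PySem.List.pyGetD xs (PySem.Int.mod i (PySem.List.len xs)) 0)) init' := by
    intro init'
    rw [PySem.List.pyRange_one 0 (PySem.List.len xs),
        PySem.List.pyRange_one (PySem.List.len xs) (PySem.List.len xs * 2),
        List.foldl_map, List.foldl_map]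
    have hlen : (PySem.List.len xs * 2 - PySem.List.len xs) = (PySem.List.len xs - 0) := by ring
    rw [hlen]
    have hbody : (fun (st : Int × Int) (k : Nat) =>
          f st (PySem.List.pyGetD xs (PySem.Int.mod (PySem.List.len xs + (k : Int)) (PySem.List.len xs)) 0))
        = (fun (st : Int × Int) (k : Nat) =>
          f st (PySem.List.pyGetD xs (PySem.Int.mod (0 + (k : Int)) (PySem.List.len xs)) 0)) := by
      funext st k
      congr 2
      rw [PySem.Int.mod_eq_emod_of_pos hn, PySem.Int.mod_eq_emod_of_pos hn]
      have h1 : PySem.List.len xs + (k : Int) = (k : Int) + PySem.List.len xs * 1 := by ring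
      rw [h1, Int.add_mul_emod_self_left]
      norm_num
    rw [hbody]
  rw [hsecond, hfirst]

-- ===== VERDICT (by name: the statement is the Claim_ definition above) =====
theorem exceedMininRow_spec : Claim_equal_exceedMininRow := by
  intro xs _ hpre
  unfold Spec_exceedMininRow exceedMininRow exceedMininRow_alt
  cases hmin : PySem.List.min? xs (fun x => x) with
  | none => rfl
  | some m =>
    dsimp only
    rw [pvDouble xs hpre (pvStepA m) (0, 0), List.foldl_append,
        pvFoldA_eq_foldB m xs (0, 0) le_rfl]
    have hInv := pvInv_foldB m xs (0, 0) le_rfl le_rfl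
    rw [pvFoldA_eq_foldB m xs _ (le_trans hInv.1 hInv.2)]
    have hmem : m ∈ xs := PySem.List.min?_mem hmin
    obtain ⟨lead, w, rest, heq, hall, hw, hcnt⟩ :=
      pvExists_dec m xs ⟨m, hmem, lt_irrefl m⟩
    have hL : (0:Int) ≤ (lead.length : Int) := by positivity
    have hstepw : ∀ (b t : Int), 0 ≤ b → pvStepB m (b, t) w = (b, 0) := by
      intro b t hb
      unfold pvStepB
      simp only [if_neg hw]
      rw [max_eq_left hb]
    have hR := pvInv_foldB m rest (0, 0) le_rfl le_rfl
    have hbase : xs.foldl (pvStepB m) (0, 0) =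
        (max (lead.length : Int) (rest.foldl (pvStepB m) (0, 0)).1,
         (rest.foldl (pvStepB m) (0, 0)).2) := by
      rw [heq, List.foldl_append, List.foldl_cons,
          pvFoldB_run m lead 0 0 hall le_rfl le_rfl]
      have h1 : max (0:Int) (0 + (lead.length : Int)) = (lead.length : Int) := by omega
      have h2 : (0:Int) + (lead.length : Int) = (lead.length : Int) := by ring
      rw [h1, h2, hstepw _ _ hL]
      have h3 : ((lead.length : Int), (0:Int)) = (max (lead.length : Int) 0, 0) := by
        rw [max_eq_left hL]
      rw [h3, pvFoldB_shift m rest (lead.length : Int) 0 0]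
    rw [hcnt, hbase, heq, List.foldl_append, List.foldl_cons]
    have hb1 : (rest.foldl (pvStepB m) (0, 0)).2 ≤
        max (lead.length : Int) (rest.foldl (pvStepB m) (0, 0)).1 :=
      le_trans hR.2 (le_max_right _ _)
    rw [pvFoldB_run m lead _ _ hall hR.1 hb1]
    have hb2 : (0:Int) ≤
        max (max (lead.length : Int) (rest.foldl (pvStepB m) (0, 0)).1)
          ((rest.foldl (pvStepB m) (0, 0)).2 + (lead.length : Int)) := by
      have := le_trans hR.1 hR.2
      omega
    rw [hstepw _ _ hb2]
    have h4 : (max (max (lead.length : Int) (rest.foldl (pvStepB m) (0, 0)).1)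
          ((rest.foldl (pvStepB m) (0, 0)).2 + (lead.length : Int)), (0:Int)) =
        (max (max (max (lead.length : Int) (rest.foldl (pvStepB m) (0, 0)).1)
          ((rest.foldl (pvStepB m) (0, 0)).2 + (lead.length : Int))) 0, 0) := by
      rw [max_eq_left hb2]
    rw [h4, pvFoldB_shift m rest _ 0 0]
    have := hR.2
    omega
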